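-- pv_equiv track=rewrite | github.com/raeez/chiral-bar-cobar | compute/lib/linf_modular_higher.py | unshuffles
-- ===== SOURCE A (Python) =====
-- from itertools import combinations
-- from typing import Any, Dict, List, Optional, Tuple
--
-- def unshuffles(n: int, p: int) -> List[Tuple[Tuple[int, ...], Tuple[int, ...]]]:
--     """All (p, n-p)-unshuffles of {0, 1, ..., n-1}.
--
--     An (p, q)-unshuffle sigma of {0,...,n-1} with n = p + q has
--     sigma(0) < ... < sigma(p-1) and sigma(p) < ... < sigma(n-1).
--
--     Returns list of (first_part, second_part).
--     """
--     q = n - p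
--     if q < 0:
--         return []
--     result = []
--     for first in combinations(range(n), p):
--         second = tuple(i for i in range(n) if i not in first)
--         result.append((first, second))
--     return result
-- ===== SOURCE B (Python) =====
-- def unshuffles(n, p):
--     """All (p, n-p)-unshuffles, built iteratively: scan i = 0..n-1 keeping a
--     list of partial states (first, second, k) where k is the remaining
--     first-part capacity; each state branches 'i joins first' (when k > 0)
--     then 'i joins second' (only when capacity still fits the remaining
--     elements), which preserves the lexicographic order of the first parts."""
--     if n - p < 0:
--         return []
--     states = [((), (), p)]
--     for i in range(n):
--         rem = n - i - 1  # elements remaining after i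
--         nxt = []
--         for f, s, k in states:
--             if k > 0:
--                 nxt.append((f + (i,), s, k - 1))
--             if k <= rem:
--                 nxt.append((f, s + (i,), k))
--         states = nxt
--     return [(f, s) for f, s, k in states if k == 0]
-- ===== Notes on version B (the rewrite author's own statement) =====
-- stated objective: alternative
-- what changed: Replaces itertools.combinations plus an O(n) complement filter per combination by a binary recursion that assigns each element directly to the first or second part, building both sorted parts at once in the same lexicographic order.
import Mathlib
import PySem

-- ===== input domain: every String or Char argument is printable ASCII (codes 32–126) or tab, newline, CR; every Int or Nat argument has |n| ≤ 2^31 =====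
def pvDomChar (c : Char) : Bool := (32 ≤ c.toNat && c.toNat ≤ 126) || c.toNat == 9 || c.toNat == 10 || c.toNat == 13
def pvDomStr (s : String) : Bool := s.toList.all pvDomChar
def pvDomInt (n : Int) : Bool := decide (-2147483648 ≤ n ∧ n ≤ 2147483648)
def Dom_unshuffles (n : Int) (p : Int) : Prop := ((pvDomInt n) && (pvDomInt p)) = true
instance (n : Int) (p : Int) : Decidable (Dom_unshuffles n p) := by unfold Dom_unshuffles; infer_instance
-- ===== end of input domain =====

-- B replaces the combinations-then-complement-filter enumeration by a binary
-- recursion assigning each element to the first or second part directly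
-- (alternative decomposition, same lexicographic output order).


-- ===== PORT A =====
-- itertools.combinations(xs, k) in lexicographic order
def combA : List Int → Nat → List (List Int)
  | _, 0 => [[]]
  | [], _ + 1 => []
  | x :: xs, k + 1 => (combA xs k).map (x :: ·) ++ combA xs (k + 1)

def unshuffles (n : Int) (p : Int) : List (List Int × List Int) :=
  if n - p < 0 then []
  else
    let rng : List Int := (List.range n.toNat).map Int.ofNat   -- range(n)
    -- p.toNat: inside Pre_ we have 0 ≤ p here; Python raises for p < 0
    (combA rng p.toNat).map (fun first =>
      (first, rng.filter (fun i => ¬ first.contains i)))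

-- ===== PORT B =====
-- loop body for index i: each state (first, second, k) branches to
-- 'i joins first' (when k > 0) then 'i joins second' (when k ≤ rem)
def stepB (i : Int) (rem : Int) (st : List (List Int × List Int × Int)) :
    List (List Int × List Int × Int) :=
  st.flatMap (fun fsk =>
    (if fsk.2.2 > 0 then [(fsk.1 ++ [i], fsk.2.1, fsk.2.2 - 1)] else [])
    ++ (if fsk.2.2 ≤ rem then [(fsk.1, fsk.2.1 ++ [i], fsk.2.2)] else []))

-- the 'for i in range(n)' loop as recursion on the number m of indices left;
-- Python's rem = n - i - 1 is exactly that remaining count after i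
def runB (i : Int) (m : Nat) (st : List (List Int × List Int × Int)) :
    List (List Int × List Int × Int) :=
  match m with
  | 0 => st
  | m + 1 => runB (i + 1) m (stepB i (↑m) st)

def unshuffles_alt (n : Int) (p : Int) : List (List Int × List Int) :=
  if n - p < 0 then []
  else
    ((runB 0 n.toNat [([], [], p)]).filter (fun fsk => fsk.2.2 == 0)).map
      (fun fsk => (fsk.1, fsk.2.1))

-- ===== PRECONDITION & SPEC =====
-- Pre_ excludes exactly the inputs with p < 0 and p ≤ n, on which Python A
-- raises ValueError (combinations with a negative size).
def Pre_unshuffles (n : Int) (p : Int) : Prop := 0 ≤ p ∨ n < p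
instance (n : Int) (p : Int) : Decidable (Pre_unshuffles n p) := by unfold Pre_unshuffles; infer_instance
def pvWitness_unshuffles : Int × Int := (4, 2)

def Spec_unshuffles (n : Int) (p : Int) (out : List (List Int × List Int)) : Prop := out = unshuffles_alt n p
instance (n : Int) (p : Int) (out : List (List Int × List Int)) : Decidable (Spec_unshuffles n p out) := by unfold Spec_unshuffles; infer_instance

-- ===== CLAIM (what is proved, stated in full; the proofs are below) =====
def Claim_equal_unshuffles : Prop := ∀ (n : Int) (p : Int), Dom_unshuffles n p → Pre_unshuffles n p → Spec_unshuffles n p (unshuffles n p)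

-- ===== LEMMAS AND PROOFS =====

-- proof-side model of B's loop: one branch tree per starting state
def altRec (k : Int) (i : Int) : Nat → List (List Int × List Int)
  | 0 => if k = 0 then [([], [])] else []
  | m + 1 =>
    (if k > 0 then (altRec (k - 1) (i + 1) m).map (fun fs => (i :: fs.1, fs.2)) else [])
    ++ (altRec k (i + 1) m).map (fun fs => (fs.1, i :: fs.2))

theorem runB_append : ∀ (m : Nat) (i : Int) (st1 st2 : List (List Int × List Int × Int)),
    runB i m (st1 ++ st2) = runB i m st1 ++ runB i m st2 := by
  intro m
  induction m with
  | zero => intro i st1 st2; simp [runB]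
  | succ m ih =>
    intro i st1 st2
    simp only [runB, stepB, List.flatMap_append]
    exact ih (i + 1) _ _

theorem runB_nil : ∀ (m : Nat) (i : Int), runB i m [] = [] := by
  intro m
  induction m with
  | zero => intro i; simp [runB]
  | succ m ih => intro i; simp [runB, stepB, ih]

theorem altRec_nil : ∀ (m : Nat) (i k : Int), (↑m : Int) < k → altRec k i m = [] := by
  intro m
  induction m with
  | zero => intro i k hk; simp [altRec]; omega
  | succ m ih =>
    intro i k hk
    have h1 : altRec (k - 1) (i + 1) m = [] := ih (i + 1) (k - 1) (by push_cast at hk ⊢; omega)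
    have h2 : altRec k (i + 1) m = [] := ih (i + 1) k (by push_cast at hk ⊢; omega)
    simp [altRec, h1, h2]

-- B's loop from one state = the branch tree, prefixed by that state's parts
theorem runB_single : ∀ (m : Nat) (i : Int) (f s : List Int) (k : Int),
    ((runB i m [(f, s, k)]).filter (fun fsk => fsk.2.2 == 0)).map
        (fun fsk => (fsk.1, fsk.2.1))
      = (altRec k i m).map (fun ab => (f ++ ab.1, s ++ ab.2)) := by
  intro m
  induction m with
  | zero =>
    intro i f s k
    by_cases hk : k = 0
    · subst hk; simp [runB, altRec]
    · simp [runB, altRec, hk]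
  | succ m ih =>
    intro i f s k
    have hstep : stepB i (↑m) [(f, s, k)]
        = (if k > 0 then [(f ++ [i], s, k - 1)] else [])
          ++ (if k ≤ (↑m : Int) then [(f, s ++ [i], k)] else []) := by
      simp [stepB]
    simp only [runB, hstep]
    rw [runB_append, List.filter_append, List.map_append]
    have hfst :
        ((runB (i + 1) m (if k > 0 then [(f ++ [i], s, k - 1)] else [])).filter
            (fun fsk => fsk.2.2 == 0)).map (fun fsk => (fsk.1, fsk.2.1))
          = (if k > 0 then
              (altRec (k - 1) (i + 1) m).map (fun fs => (i :: fs.1, fs.2))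
            else []).map (fun ab => (f ++ ab.1, s ++ ab.2)) := by
      by_cases hk : k > 0
      · simp only [if_pos hk]
        rw [ih (i + 1) (f ++ [i]) s (k - 1)]
        simp [List.map_map, Function.comp, List.append_assoc]
      · simp [if_neg hk, runB_nil]
    have hsnd :
        ((runB (i + 1) m (if k ≤ (↑m : Int) then [(f, s ++ [i], k)] else [])).filter
            (fun fsk => fsk.2.2 == 0)).map (fun fsk => (fsk.1, fsk.2.1))
          = ((altRec k (i + 1) m).map (fun fs => (fs.1, i :: fs.2))).map
              (fun ab => (f ++ ab.1, s ++ ab.2)) := by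
      by_cases hk : k ≤ (↑m : Int)
      · simp only [if_pos hk]
        rw [ih (i + 1) f (s ++ [i]) k]
        simp [List.map_map, Function.comp, List.append_assoc]
      · rw [if_neg hk, runB_nil, altRec_nil m (i + 1) k (by omega)]
        simp
    rw [hfst, hsnd, altRec, List.map_append]

-- [i, i+1, ..., i+m-1]
def rngFrom (i : Int) : Nat → List Int
  | 0 => []
  | m + 1 => i :: rngFrom (i + 1) m

theorem mem_rngFrom {x i : Int} : ∀ {m : Nat}, x ∈ rngFrom i m → i ≤ x := by
  intro m
  induction m generalizing i with
  | zero => simp [rngFrom]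
  | succ m ih =>
    simp only [rngFrom, List.mem_cons]
    rintro (rfl | h)
    · exact le_refl x
    · have := ih h; omega

theorem combA_subset : ∀ (xs : List Int) (k : Nat) (f : List Int),
    f ∈ combA xs k → ∀ x ∈ f, x ∈ xs := by
  intro xs
  induction xs with
  | nil =>
    intro k f h
    match k, h with
    | 0, h => simp [combA] at h; simp [h]
  | cons y ys ih =>
    intro k f h
    match k with
    | 0 => simp [combA] at h; simp [h]
    | k + 1 =>
      simp only [combA, List.mem_append, List.mem_map] at h
      rcases h with ⟨g, hg, rfl⟩ | h
      · intro x hx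
        rcases List.mem_cons.1 hx with rfl | hx
        · exact List.mem_cons_self
        · exact List.mem_cons_of_mem _ (ih k g hg x hx)
      · intro x hx
        exact List.mem_cons_of_mem _ (ih (k + 1) f h x hx)

theorem filt_cons_mem (i : Int) (f l : List Int) (h : ∀ x ∈ l, x ≠ i) :
    List.filter (fun x => ¬ (i :: f).contains x) (i :: l)
      = List.filter (fun x => ¬ f.contains x) l := by
  rw [List.filter_cons]
  simp only [List.contains_cons, BEq.rfl, Bool.true_or, Bool.not_true,
    decide_false, if_false]
  apply List.filter_congr
  intro x hx
  have hxne : x ≠ i := h x hx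
  simp [List.contains_cons, hxne]

theorem filt_cons_nomem (i : Int) (f l : List Int) (h : f.contains i = false) :
    List.filter (fun x => ¬ f.contains x) (i :: l)
      = i :: List.filter (fun x => ¬ f.contains x) l := by
  rw [List.filter_cons]
  have hnm : i ∉ f := by simpa using h
  simp [hnm]

theorem altRec_zero : ∀ (m : Nat) (i : Int), altRec 0 i m = [([], rngFrom i m)] := by
  intro m
  induction m with
  | zero => intro i; simp [altRec, rngFrom]
  | succ m ih => intro i; simp [altRec, rngFrom, ih (i + 1)]

-- main invariant: the binary recursion equals combinations + complement filter
theorem altRec_eq : ∀ (m : Nat) (i : Int) (k : Nat),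
    altRec (↑k) i m =
      (combA (rngFrom i m) k).map
        (fun f => (f, (rngFrom i m).filter (fun x => ¬ f.contains x))) := by
  intro m
  induction m with
  | zero =>
    intro i k
    cases k with
    | zero => simp [altRec, rngFrom, combA]
    | succ k =>
      simp only [altRec]
      rw [if_neg (by push_cast; omega)]
      simp [rngFrom, combA]
  | succ m ih =>
    intro i k
    have hgt : ∀ x ∈ rngFrom (i + 1) m, x ≠ i := by
      intro x hx; have := mem_rngFrom hx; omega
    cases k with
    | zero =>
      have hbig : ∀ x ∈ rngFrom i (m + 1), ¬ ([] : List Int).contains x := by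
        intro x _; simp
      simp only [Nat.cast_zero, altRec_zero, combA, List.map_cons, List.map_nil]
      rw [List.filter_eq_self.mpr (by intro x hx; simpa using hbig x hx)]
    | succ k =>
      have h1 : (0 : Int) < ((k + 1 : Nat) : Int) := by positivity
      have h2 : ((k + 1 : Nat) : Int) - 1 = ((k : Nat) : Int) := by push_cast; ring
      have hsplit : altRec (↑(k + 1 : Nat)) i (m + 1)
          = (altRec (↑k) (i + 1) m).map (fun fs => (i :: fs.1, fs.2))
            ++ (altRec (↑(k + 1 : Nat)) (i + 1) m).map (fun fs => (fs.1, i :: fs.2)) := by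
        rw [altRec]
        rw [if_pos h1, h2]
      rw [hsplit, ih (i + 1) k, ih (i + 1) (k + 1)]
      simp only [rngFrom, combA, List.map_append, List.map_map]
      congr 1
      · apply List.map_congr_left
        intro f hf
        simp only [Function.comp]
        rw [show (rngFrom (i + 1) m).filter (fun x => ¬ f.contains x)
              = List.filter (fun x => ¬ (i :: f).contains x) (i :: rngFrom (i + 1) m) from
            (filt_cons_mem i f _ hgt).symm]
      · apply List.map_congr_left
        intro f hf
        have hsub := combA_subset _ _ _ hf
        have hi : f.contains i = false := by
          by_contra hc
          have hm : i ∈ f := by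
            have := Bool.not_eq_false (f.contains i) |>.mp hc
            simpa using this
          exact hgt i (hsub i hm) rfl
        simp only [Function.comp]
        rw [filt_cons_nomem i f _ hi]

theorem rngFrom_eq : ∀ (m : Nat) (i : Int),
    rngFrom i m = List.map (fun (j : Nat) => i + (j : Int)) (List.range m) := by
  intro m
  induction m with
  | zero => intro i; simp [rngFrom]
  | succ m ih =>
    intro i
    rw [List.range_succ_eq_map]
    simp only [rngFrom, List.map_cons, List.map_map, ih (i + 1)]
    congr 1
    · simp
    · apply List.map_congr_left
      intro j _
      simp only [Function.comp, Nat.succ_eq_add_one]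
      push_cast
      ring

theorem rngFrom_zero (m : Nat) :
    rngFrom 0 m = (List.range m).map Int.ofNat := by
  rw [rngFrom_eq]
  apply List.map_congr_left
  intro j _
  simp

-- ===== VERDICT (by name: the statement is the Claim_ definition above) =====
theorem unshuffles_spec : Claim_equal_unshuffles := by
  intro n p _ hpre
  unfold Spec_unshuffles unshuffles unshuffles_alt
  by_cases hneg : n - p < 0
  · simp [hneg]
  · have hpn : p ≤ n := by omega
    have hp0 : 0 ≤ p := by
      rcases hpre with h | h
      · exact h
      · omega
    have hpcast : (↑p.toNat : Int) = p := Int.toNat_of_nonneg hp0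
    simp only [hneg, if_false]
    rw [runB_single n.toNat 0 [] [] p]
    rw [show altRec p 0 n.toNat = altRec (↑p.toNat) 0 n.toNat by rw [hpcast]]
    rw [altRec_eq n.toNat 0 p.toNat, rngFrom_zero, List.map_map]
    simp [Function.comp]
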